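-- pv_equiv track=rewrite | github.com/rayz1065/competitive-programming | uva/introduction/life-problems-harder/lc-display/main.py | resize_digit
-- ===== SOURCE A (Python) =====
-- NUMBERS = [
--     ' - ', '   ', ' - ', ' - ', '   ', ' - ', ' - ', ' - ', ' - ', ' - ',
--     '| |', '  |', '  |', '  |', '| |', '|  ', '|  ', '  |', '| |', '| |',
--     '   ', '   ', ' - ', ' - ', ' - ', ' - ', ' - ', '   ', ' - ', ' - ',
--     '| |', '  |', '|  ', '  |', '  |', '  |', '| |', '  |', '| |', '  |',
--     ' - ', '   ', ' - ', ' - ', '   ', ' - ', ' - ', '   ', ' - ', ' - ',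
-- ]
--
-- def number_rows (digit):
--     for k in range(len(NUMBERS) // 10):
--         yield NUMBERS[(digit + k * 10)]
--
-- def get_segments (digit):
--     for i, row in enumerate(number_rows(digit)):
--         for j, cell in enumerate(row):
--             if cell == '-':
--                 yield i // 2, None, cell
--             if cell == '|':
--                 yield i // 2, j // 2, cell
--
-- def resize_digit (digit, scale):
--     # this is overly complicated
--     square_size = scale + 1
--     height = square_size * 2 + 1
--     width = square_size + 1
--
--     result = [[' '] * width for _ in range(height)]
--     for row, column, segment in get_segments(digit):
--         if segment == '-':
--             for j in range(1, square_size):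
--                 result[row * (scale + 1)][j] = '-'
--         else:
--             for i in range(1, square_size):
--                 result[row * (scale + 1) + i][column * square_size] = '|'
--
--     return [''.join(x) for x in result]
-- ===== SOURCE B (Python) =====
-- NUMBERS = [
--     ' - ', '   ', ' - ', ' - ', '   ', ' - ', ' - ', ' - ', ' - ', ' - ',
--     '| |', '  |', '  |', '  |', '| |', '|  ', '|  ', '  |', '| |', '| |',
--     '   ', '   ', ' - ', ' - ', ' - ', ' - ', ' - ', '   ', ' - ', ' - ',
--     '| |', '  |', '|  ', '  |', '  |', '  |', '| |', '  |', '| |', '  |',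
--     ' - ', '   ', ' - ', ' - ', '   ', ' - ', ' - ', '   ', ' - ', ' - ',
-- ]
--
--
-- def _horiz(seg, scale):
--     return ' ' + ('-' if seg else ' ') * scale + ' '
--
--
-- def _vert(left, right, scale):
--     return ('|' if left else ' ') + ' ' * scale + ('|' if right else ' ')
--
--
-- def resize_digit(digit, scale):
--     rows = [NUMBERS[digit + 10 * k] for k in range(5)]
--     top, mid, bot = rows[0][1] == '-', rows[2][1] == '-', rows[4][1] == '-'
--     ul, ur = rows[1][0] == '|', rows[1][2] == '|'
--     ll, lr = rows[3][0] == '|', rows[3][2] == '|'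
--     return ([_horiz(top, scale)]
--             + [_vert(ul, ur, scale)] * scale
--             + [_horiz(mid, scale)]
--             + [_vert(ll, lr, scale)] * scale
--             + [_horiz(bot, scale)])
-- ===== Notes on version B (the rewrite author's own statement) =====
-- stated objective: idiomatic
-- what changed: B reads the seven LCD segment flags directly off the digit's five NUMBERS rows and builds each output line as a string (horizontal/vertical line constructors + list repetition), instead of A's generator pipeline that enumerates segment tuples and mutates a pre-allocated character grid cell by cell.
-- outside the precondition, e.g. on resize_digit(0, -1): A returns [' '], B returns ['  ', '  ', '  ']
import Mathlib
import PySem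

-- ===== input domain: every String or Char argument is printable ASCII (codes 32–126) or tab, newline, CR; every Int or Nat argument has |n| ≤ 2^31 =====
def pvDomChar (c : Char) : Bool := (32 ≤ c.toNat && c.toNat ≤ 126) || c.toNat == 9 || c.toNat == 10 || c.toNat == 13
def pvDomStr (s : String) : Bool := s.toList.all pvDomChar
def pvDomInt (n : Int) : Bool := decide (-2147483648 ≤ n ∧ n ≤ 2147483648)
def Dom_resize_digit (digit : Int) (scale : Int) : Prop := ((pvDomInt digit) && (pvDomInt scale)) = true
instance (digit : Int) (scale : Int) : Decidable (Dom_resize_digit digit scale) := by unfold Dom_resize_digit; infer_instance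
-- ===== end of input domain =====

-- B renders the digit directly: it reads the seven LCD segment flags off the five NUMBERS rows
-- and builds each output line as a string, instead of A's mutate-a-character-grid-per-segment loop (objective: idiomatic).

-- the module constant, shared by both ports
def NUMBERS : List String := [
    " - ", "   ", " - ", " - ", "   ", " - ", " - ", " - ", " - ", " - ",
    "| |", "  |", "  |", "  |", "| |", "|  ", "|  ", "  |", "| |", "| |",
    "   ", "   ", " - ", " - ", " - ", " - ", " - ", "   ", " - ", " - ",
    "| |", "  |", "|  ", "  |", "  |", "  |", "| |", "  |", "| |", "  |",
    " - ", "   ", " - ", " - ", "   ", " - ", " - ", "   ", " - ", " - "]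

-- ===== PORT A =====

-- number_rows: NUMBERS[digit + k*10] raises IndexError for digit outside [-50, 9] (excluded by Pre_);
-- the .getD "" default is never reached inside Pre_.
def numberRows (digit : Int) : List String :=
  (PySem.List.pyRange 0 (PySem.Int.floordiv (NUMBERS.length : Int) 10) 1).map
    (fun k => (PySem.List.pyGet? NUMBERS (digit + k * 10)).getD "")

def getSegments (digit : Int) : List (Int × Option Int × Char) :=
  (PySem.List.enumerate (numberRows digit)).flatMap (fun iRow =>
    (PySem.List.enumerate iRow.2.toList).flatMap (fun jCell =>
      (if jCell.2 = '-' then [(PySem.Int.floordiv iRow.1 2, (none : Option Int), jCell.2)] else []) ++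
      (if jCell.2 = '|' then [(PySem.Int.floordiv iRow.1 2, some (PySem.Int.floordiv jCell.1 2), jCell.2)] else [])))

-- in-place update of one list position (no-op out of range; Python's result[y][x] = c raises
-- IndexError there and wraps negative indices — both excluded by Pre_, inside which y,x are
-- nonnegative and in range, where this is exact)
def listUpd {α : Type} : List α → Nat → (α → α) → List α
  | [], _, _ => []
  | a :: l, 0, f => f a :: l
  | a :: l, n+1, f => a :: listUpd l n f

def set2d (g : List (List Char)) (y x : Int) (c : Char) : List (List Char) :=
  listUpd g y.toNat (fun row => listUpd row x.toNat (fun _ => c))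

-- body of A's `for row, column, segment in get_segments(digit)` loop
def applySegment (scale : Int) (res : List (List Char)) (seg : Int × Option Int × Char) : List (List Char) :=
  if seg.2.2 = '-' then
    (PySem.List.pyRange 1 (scale + 1) 1).foldl (fun res j => set2d res (seg.1 * (scale + 1)) j '-') res
  else
    -- column is an int (not None) in this branch; .getD 0 is never reached
    (PySem.List.pyRange 1 (scale + 1) 1).foldl
      (fun res i => set2d res (seg.1 * (scale + 1) + i) ((seg.2.1.getD 0) * (scale + 1)) '|') res

def resize_digit (digit : Int) (scale : Int) : List String :=
  let squareSize := scale + 1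
  let height := squareSize * 2 + 1
  let width := squareSize + 1
  let result := List.replicate height.toNat (List.replicate width.toNat ' ')
  let result := (getSegments digit).foldl (applySegment scale) result
  result.map (fun x => String.ofList x)

-- ===== PORT B =====

-- rows[k][j]; every row read inside Pre_ has length 3, where this is exact
def rowChar (s : String) (j : Nat) : Char := s.toList.getD j ' '

def nthRow (digit : Int) (k : Int) : String :=
  (PySem.List.pyGet? NUMBERS (digit + 10 * k)).getD ""

def horizLine (seg : Bool) (scale : Int) : String :=
  String.ofList (' ' :: List.replicate scale.toNat (if seg then '-' else ' ') ++ [' '])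

def vertLine (left right : Bool) (scale : Int) : String :=
  String.ofList ((if left then '|' else ' ') :: List.replicate scale.toNat ' ' ++ [if right then '|' else ' '])

def resize_digit_alt (digit : Int) (scale : Int) : List String :=
  let top := rowChar (nthRow digit 0) 1 == '-'
  let mid := rowChar (nthRow digit 2) 1 == '-'
  let bot := rowChar (nthRow digit 4) 1 == '-'
  let ul := rowChar (nthRow digit 1) 0 == '|'
  let ur := rowChar (nthRow digit 1) 2 == '|'
  let ll := rowChar (nthRow digit 3) 0 == '|'
  let lr := rowChar (nthRow digit 3) 2 == '|'
  [horizLine top scale] ++ List.replicate scale.toNat (vertLine ul ur scale)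
    ++ [horizLine mid scale] ++ List.replicate scale.toNat (vertLine ll lr scale)
    ++ [horizLine bot scale]

-- ===== PRECONDITION & SPEC =====
-- Pre_ restricts to the function's natural domain: an actual decimal digit (0–9) and a
-- nonnegative scale.  Outside it A still returns on some inputs, but those values are artefacts:
-- for digit outside 0–9 the NUMBERS lookups wrap around (Python negative indexing) into
-- unrelated table rows — usually an IndexError, otherwise garbage rows — and for negative scale
-- the grid comprehension degenerates to [] or [' '].
def Pre_resize_digit (digit : Int) (scale : Int) : Prop := 0 ≤ digit ∧ digit ≤ 9 ∧ 0 ≤ scale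
instance (digit : Int) (scale : Int) : Decidable (Pre_resize_digit digit scale) := by
  unfold Pre_resize_digit; infer_instance
def pvWitness_resize_digit : Int × Int := (2, 1)

def Spec_resize_digit (digit : Int) (scale : Int) (out : List String) : Prop := out = resize_digit_alt digit scale
instance (digit : Int) (scale : Int) (out : List String) : Decidable (Spec_resize_digit digit scale out) := by unfold Spec_resize_digit; infer_instance

-- ===== CLAIM (what is proved, stated in full; the proofs are below) =====
def Claim_equal_resize_digit : Prop := ∀ (digit : Int) (scale : Int), Dom_resize_digit digit scale → Pre_resize_digit digit scale → Spec_resize_digit digit scale (resize_digit digit scale)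

-- ===== LEMMAS AND PROOFS =====

-- canonical seven-segment rendering, at scale n, as character rows
def hrowL (b : Bool) (n : Nat) : List Char := ' ' :: List.replicate n (if b then '-' else ' ') ++ [' ']
def vrowL (l r : Bool) (n : Nat) : List Char :=
  (if l then '|' else ' ') :: List.replicate n ' ' ++ [if r then '|' else ' ']
def shape (t m b ul ur ll lr : Bool) (n : Nat) : List (List Char) :=
  hrowL t n :: (List.replicate n (vrowL ul ur n) ++ hrowL m n ::
    (List.replicate n (vrowL ll lr n) ++ [hrowL b n]))

-- A's segment stream, ordered the way get_segments yields it, as a function of the seven flags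
def segList (t ul ur m ll lr b : Bool) : List (Int × Option Int × Char) :=
  (if t then [((0:Int), (none : Option Int), '-')] else []) ++
  (if ul then [((0:Int), some 0, '|')] else []) ++
  (if ur then [((0:Int), some 1, '|')] else []) ++
  (if m then [((1:Int), (none : Option Int), '-')] else []) ++
  (if ll then [((1:Int), some 0, '|')] else []) ++
  (if lr then [((1:Int), some 1, '|')] else []) ++
  (if b then [((2:Int), (none : Option Int), '-')] else [])

theorem listUpd_id {α : Type} (l : List α) (i : Nat) : listUpd l i (fun a => a) = l := by
  induction l generalizing i with
  | nil => rfl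
  | cons a l ih => cases i <;> simp [listUpd, ih]

theorem listUpd_listUpd {α : Type} (l : List α) (i : Nat) (f g : α → α) :
    listUpd (listUpd l i f) i g = listUpd l i (fun a => g (f a)) := by
  induction l generalizing i with
  | nil => rfl
  | cons a l ih => cases i <;> simp [listUpd, ih]

theorem listUpd_append {α : Type} (P L : List α) (i : Nat) (f : α → α) :
    listUpd (P ++ L) (P.length + i) f = P ++ listUpd L i f := by
  induction P with
  | nil => simp
  | cons a P ih => simpa [listUpd, Nat.succ_add] using ih

theorem listUpd_at {α : Type} (P : List α) (a : α) (Q : List α) (f : α → α) :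
    listUpd (P ++ a :: Q) P.length f = P ++ f a :: Q := by
  simpa using listUpd_append P (a :: Q) 0 f

theorem listUpd_at' {α : Type} (P : List α) (a : α) (Q : List α) (f : α → α) (k : Nat)
    (h : P.length = k) : listUpd (P ++ a :: Q) k f = P ++ f a :: Q := by
  subst h; exact listUpd_at P a Q f

theorem applySegment_dash (s : Int) (res : List (List Char)) (r : Int) :
    applySegment s res (r, (none : Option Int), '-')
      = (PySem.List.pyRange 1 (s + 1) 1).foldl (fun res j => set2d res (r * (s + 1)) j '-') res := by
  simp [applySegment]

theorem applySegment_bar (s : Int) (res : List (List Char)) (r c : Int) :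
    applySegment s res (r, some c, '|')
      = (PySem.List.pyRange 1 (s + 1) 1).foldl
          (fun res i => set2d res (r * (s + 1) + i) (c * (s + 1)) '|') res := by
  simp [applySegment]

theorem foldl_listUpd_same {α β : Type} (l : List β) (g : List α) (y : Nat) (f : β → α → α) :
    l.foldl (fun g a => listUpd g y (f a)) g
      = listUpd g y (fun r => l.foldl (fun r a => f a r) r) := by
  induction l generalizing g with
  | nil => simp [listUpd_id]
  | cons a l ih => simp [ih, listUpd_listUpd]

theorem Hfold (n : Nat) (y : Int) (g : List (List Char)) :
    (PySem.List.pyRange 1 ((n : Int) + 1) 1).foldl (fun res j => set2d res y j '-') g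
      = listUpd g y.toNat
          (fun row => (List.range n).foldl (fun row j => listUpd row (j+1) (fun _ => '-')) row) := by
  rw [PySem.List.pyRange_one]
  have h1 : (((n : Int) + 1) - 1).toNat = n := by omega
  rw [h1, List.foldl_map]
  have h2 : (fun (res : List (List Char)) (j : Nat) => set2d res y (1 + (j : Int)) '-')
      = fun res j => listUpd res y.toNat (fun row => listUpd row (j+1) (fun _ => '-')) := by
    funext res j
    have : ((1 : Int) + (j : Int)).toNat = j + 1 := by omega
    simp [set2d, this]
  rw [h2, foldl_listUpd_same]

theorem Vfold (n : Nat) (y x : Int) (hy : 0 ≤ y) (g : List (List Char)) :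
    (PySem.List.pyRange 1 ((n : Int) + 1) 1).foldl (fun res i => set2d res (y + i) x '|') g
      = (List.range n).foldl
          (fun g i => listUpd g (y.toNat + (i+1)) (fun row => listUpd row x.toNat (fun _ => '|'))) g := by
  rw [PySem.List.pyRange_one]
  have h1 : (((n : Int) + 1) - 1).toNat = n := by omega
  rw [h1, List.foldl_map]
  congr 1
  funext g i
  have : (y + (1 + (i : Int))).toNat = y.toNat + (i + 1) := by omega
  simp [set2d, this]

theorem rowH (n : Nat) : ∀ Q : List Char,
    (List.range n).foldl (fun row j => listUpd row (j+1) (fun _ => '-'))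
        (' ' :: List.replicate n ' ' ++ Q)
      = ' ' :: List.replicate n '-' ++ Q := by
  induction n with
  | zero => intro Q; simp
  | succ n ih =>
      intro Q
      have hs : (' ' :: List.replicate (n+1) ' ' ++ Q)
          = ' ' :: List.replicate n ' ' ++ (' ' :: Q) := by
        simp [List.replicate_succ']
      rw [hs, List.range_succ, List.foldl_append, ih (' ' :: Q)]
      simp only [List.foldl_cons, List.foldl_nil]
      have : (' ' :: List.replicate n '-' ++ ' ' :: Q)
          = ' ' :: (List.replicate n '-' ++ ' ' :: Q) := by simp
      rw [this]
      show ' ' :: listUpd (List.replicate n '-' ++ ' ' :: Q) n (fun _ => '-') = _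
      rw [listUpd_at' (List.replicate n '-') ' ' Q _ n (by simp)]
      simp [List.replicate_succ']

theorem VBlock {α : Type} (f : α → α) :
    ∀ (n k : Nat) (P Q : List α) (row : α), P.length = k + 1 →
    (List.range n).foldl (fun g i => listUpd g (k + (i+1)) f) (P ++ (List.replicate n row ++ Q))
      = P ++ (List.replicate n (f row) ++ Q) := by
  intro n
  induction n with
  | zero => intro k P Q row _; simp
  | succ n ih =>
      intro k P Q row hP
      have hs : (P ++ (List.replicate (n+1) row ++ Q))
          = P ++ (List.replicate n row ++ (row :: Q)) := by
        simp [List.replicate_succ']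
      rw [hs, List.range_succ, List.foldl_append, ih k P (row :: Q) row hP]
      simp only [List.foldl_cons, List.foldl_nil]
      rw [show P ++ (List.replicate n (f row) ++ row :: Q)
            = (P ++ List.replicate n (f row)) ++ row :: Q from by simp,
          listUpd_at' (P ++ List.replicate n (f row)) row Q f (k + (n+1)) (by simp [hP]; omega)]
      simp [List.replicate_succ']

theorem vset0 (l r : Bool) (n : Nat) :
    listUpd (vrowL l r n) 0 (fun _ => '|') = vrowL true r n := by
  simp [vrowL, listUpd]

theorem vsetEnd (l r : Bool) (n : Nat) :
    listUpd (vrowL l r n) (n+1) (fun _ => '|') = vrowL l true n := by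
  show listUpd ((if l then '|' else ' ') :: (List.replicate n ' ' ++ [if r then '|' else ' '])) (n+1) _ = _
  show (if l then '|' else ' ') :: listUpd (List.replicate n ' ' ++ [if r then '|' else ' ']) n _ = _
  rw [show ([if r then '|' else ' '] : List Char) = (if r then '|' else ' ') :: [] from rfl,
      listUpd_at' (List.replicate n ' ') _ [] _ n (by simp)]
  simp [vrowL]

-- the seven optional segment applications, in A's yield order
theorem stepT (n : Nat) (t m b ul ur ll lr : Bool) :
    List.foldl (applySegment (n : Int)) (shape false m b ul ur ll lr n)
        (if t then [((0:Int), (none : Option Int), '-')] else [])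
      = shape t m b ul ur ll lr n := by
  cases t
  · rfl
  · show List.foldl (applySegment (n : Int)) _ [((0:Int), (none : Option Int), '-')] = _
    simp only [List.foldl_cons, List.foldl_nil]
    rw [applySegment_dash, show (0:Int) * ((n : Int) + 1) = 0 from by ring, Hfold,
        show ((0:Int)).toNat = 0 from rfl]
    rw [shape, shape]
    show _ :: _ = _
    congr 1
    show List.foldl (fun row j => listUpd row (j + 1) fun _ => '-')
        (' ' :: List.replicate n ' ' ++ [' ']) (List.range n) = hrowL true n
    rw [rowH n [' ']]
    simp [hrowL]

theorem stepM (n : Nat) (m t b ul ur ll lr : Bool) :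
    List.foldl (applySegment (n : Int)) (shape t false b ul ur ll lr n)
        (if m then [((1:Int), (none : Option Int), '-')] else [])
      = shape t m b ul ur ll lr n := by
  cases m
  · rfl
  · show List.foldl (applySegment (n : Int)) _ [((1:Int), (none : Option Int), '-')] = _
    simp only [List.foldl_cons, List.foldl_nil]
    rw [applySegment_dash, show (1:Int) * ((n : Int) + 1) = (n : Int) + 1 from by ring, Hfold,
        show ((n : Int) + 1).toNat = n + 1 from by omega]
    rw [shape, shape]
    rw [show hrowL t n :: (List.replicate n (vrowL ul ur n) ++ hrowL false n ::
          (List.replicate n (vrowL ll lr n) ++ [hrowL b n]))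
        = (hrowL t n :: List.replicate n (vrowL ul ur n)) ++ hrowL false n ::
          (List.replicate n (vrowL ll lr n) ++ [hrowL b n]) from by simp]
    rw [listUpd_at' (hrowL t n :: List.replicate n (vrowL ul ur n)) _ _ _ (n+1) (by simp)]
    have : hrowL false n = ' ' :: List.replicate n ' ' ++ [' '] := by simp [hrowL]
    rw [this, rowH n [' ']]
    simp [hrowL]

theorem stepB (n : Nat) (b t m ul ur ll lr : Bool) :
    List.foldl (applySegment (n : Int)) (shape t m false ul ur ll lr n)
        (if b then [((2:Int), (none : Option Int), '-')] else [])
      = shape t m b ul ur ll lr n := by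
  cases b
  · rfl
  · show List.foldl (applySegment (n : Int)) _ [((2:Int), (none : Option Int), '-')] = _
    simp only [List.foldl_cons, List.foldl_nil]
    rw [applySegment_dash, show (2:Int) * ((n : Int) + 1) = 2 * ((n : Int) + 1) from by ring, Hfold,
        show (2 * ((n : Int) + 1)).toNat = 2 * n + 2 from by omega]
    rw [shape, shape]
    rw [show hrowL t n :: (List.replicate n (vrowL ul ur n) ++ hrowL m n ::
          (List.replicate n (vrowL ll lr n) ++ [hrowL false n]))
        = (hrowL t n :: (List.replicate n (vrowL ul ur n) ++ hrowL m n ::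
            List.replicate n (vrowL ll lr n))) ++ hrowL false n :: [] from by simp]
    rw [listUpd_at' (hrowL t n :: (List.replicate n (vrowL ul ur n) ++ hrowL m n ::
          List.replicate n (vrowL ll lr n))) _ _ _ (2 * n + 2) (by simp; omega)]
    have : hrowL false n = ' ' :: List.replicate n ' ' ++ [' '] := by simp [hrowL]
    rw [this, rowH n [' ']]
    simp [hrowL]

theorem stepUL (n : Nat) (ul t m b ll lr : Bool) :
    List.foldl (applySegment (n : Int)) (shape t m b false false ll lr n)
        (if ul then [((0:Int), some 0, '|')] else [])
      = shape t m b ul false ll lr n := by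
  cases ul
  · rfl
  · show List.foldl (applySegment (n : Int)) _ [((0:Int), some 0, '|')] = _
    simp only [List.foldl_cons, List.foldl_nil]
    rw [applySegment_bar]
    have he : (fun (res : List (List Char)) (i : Int) =>
        set2d res ((0:Int) * ((n : Int) + 1) + i) ((0:Int) * ((n : Int) + 1)) '|')
        = fun res i => set2d res ((0 : Int) + i) (0 : Int) '|' := by
      funext res i; ring_nf
    rw [he, Vfold n 0 0 le_rfl]
    rw [shape, shape]
    rw [show hrowL t n :: (List.replicate n (vrowL false false n) ++ hrowL m n ::
          (List.replicate n (vrowL ll lr n) ++ [hrowL b n]))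
        = [hrowL t n] ++ (List.replicate n (vrowL false false n) ++ (hrowL m n ::
          (List.replicate n (vrowL ll lr n) ++ [hrowL b n]))) from by simp]
    rw [show (fun (g : List (List Char)) (i : Nat) =>
          listUpd g ((0:Int).toNat + (i+1)) (fun row => listUpd row (0:Int).toNat (fun _ => '|')))
        = fun g i => listUpd g (0 + (i+1)) (fun row => listUpd row 0 (fun _ => '|')) from by norm_num]
    rw [VBlock _ n 0 [hrowL t n] _ _ (by simp)]
    simp [vset0]

theorem stepUR (n : Nat) (ur t m b ul ll lr : Bool) :
    List.foldl (applySegment (n : Int)) (shape t m b ul false ll lr n)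
        (if ur then [((0:Int), some 1, '|')] else [])
      = shape t m b ul ur ll lr n := by
  cases ur
  · rfl
  · show List.foldl (applySegment (n : Int)) _ [((0:Int), some 1, '|')] = _
    simp only [List.foldl_cons, List.foldl_nil]
    rw [applySegment_bar]
    have he : (fun (res : List (List Char)) (i : Int) =>
        set2d res ((0:Int) * ((n : Int) + 1) + i) ((1:Int) * ((n : Int) + 1)) '|')
        = fun res i => set2d res ((0 : Int) + i) ((n : Int) + 1) '|' := by
      funext res i; ring_nf
    rw [he, Vfold n 0 ((n : Int) + 1) le_rfl]
    rw [shape, shape, show ((n : Int) + 1).toNat = n + 1 from by omega]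
    rw [show hrowL t n :: (List.replicate n (vrowL ul false n) ++ hrowL m n ::
          (List.replicate n (vrowL ll lr n) ++ [hrowL b n]))
        = [hrowL t n] ++ (List.replicate n (vrowL ul false n) ++ (hrowL m n ::
          (List.replicate n (vrowL ll lr n) ++ [hrowL b n]))) from by simp]
    rw [show (fun (g : List (List Char)) (i : Nat) =>
          listUpd g ((0:Int).toNat + (i+1)) (fun row => listUpd row (n+1) (fun _ => '|')))
        = fun g i => listUpd g (0 + (i+1)) (fun row => listUpd row (n+1) (fun _ => '|')) from by norm_num]
    rw [VBlock _ n 0 [hrowL t n] _ _ (by simp)]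
    simp [vsetEnd]

theorem stepLL (n : Nat) (ll t m b ul ur : Bool) :
    List.foldl (applySegment (n : Int)) (shape t m b ul ur false false n)
        (if ll then [((1:Int), some 0, '|')] else [])
      = shape t m b ul ur ll false n := by
  cases ll
  · rfl
  · show List.foldl (applySegment (n : Int)) _ [((1:Int), some 0, '|')] = _
    simp only [List.foldl_cons, List.foldl_nil]
    rw [applySegment_bar]
    have he : (fun (res : List (List Char)) (i : Int) =>
        set2d res ((1:Int) * ((n : Int) + 1) + i) ((0:Int) * ((n : Int) + 1)) '|')
        = fun res i => set2d res (((n : Int) + 1) + i) (0 : Int) '|' := by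
      funext res i; ring_nf
    rw [he, Vfold n ((n : Int) + 1) 0 (by omega)]
    rw [shape, shape, show ((n : Int) + 1).toNat = n + 1 from by omega]
    rw [show hrowL t n :: (List.replicate n (vrowL ul ur n) ++ hrowL m n ::
          (List.replicate n (vrowL false false n) ++ [hrowL b n]))
        = (hrowL t n :: List.replicate n (vrowL ul ur n) ++ [hrowL m n]) ++
          (List.replicate n (vrowL false false n) ++ [hrowL b n]) from by simp]
    rw [show (fun (g : List (List Char)) (i : Nat) =>
          listUpd g (n + 1 + (i+1)) (fun row => listUpd row (0:Int).toNat (fun _ => '|')))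
        = fun g i => listUpd g (n + 1 + (i+1)) (fun row => listUpd row 0 (fun _ => '|')) from by norm_num]
    rw [VBlock _ n (n+1) (hrowL t n :: List.replicate n (vrowL ul ur n) ++ [hrowL m n]) _ _ (by simp)]
    simp [vset0]

theorem stepLR (n : Nat) (lr t m b ul ur ll : Bool) :
    List.foldl (applySegment (n : Int)) (shape t m b ul ur ll false n)
        (if lr then [((1:Int), some 1, '|')] else [])
      = shape t m b ul ur ll lr n := by
  cases lr
  · rfl
  · show List.foldl (applySegment (n : Int)) _ [((1:Int), some 1, '|')] = _
    simp only [List.foldl_cons, List.foldl_nil]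
    rw [applySegment_bar]
    have he : (fun (res : List (List Char)) (i : Int) =>
        set2d res ((1:Int) * ((n : Int) + 1) + i) ((1:Int) * ((n : Int) + 1)) '|')
        = fun res i => set2d res (((n : Int) + 1) + i) ((n : Int) + 1) '|' := by
      funext res i; ring_nf
    rw [he, Vfold n ((n : Int) + 1) ((n : Int) + 1) (by omega)]
    rw [shape, shape, show ((n : Int) + 1).toNat = n + 1 from by omega]
    rw [show hrowL t n :: (List.replicate n (vrowL ul ur n) ++ hrowL m n ::
          (List.replicate n (vrowL ll false n) ++ [hrowL b n]))
        = (hrowL t n :: List.replicate n (vrowL ul ur n) ++ [hrowL m n]) ++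
          (List.replicate n (vrowL ll false n) ++ [hrowL b n]) from by simp]
    rw [VBlock _ n (n+1) (hrowL t n :: List.replicate n (vrowL ul ur n) ++ [hrowL m n]) _ _ (by simp)]
    simp [vsetEnd]

theorem cons_replicate_append (c : Char) (n : Nat) :
    c :: List.replicate n c ++ [c] = List.replicate (n + 2) c := by
  induction n with
  | zero => rfl
  | succ n ih =>
      show c :: (c :: List.replicate n c ++ [c]) = c :: List.replicate (n + 2) c
      exact congrArg _ ih

theorem grid0_eq (n : Nat) :
    List.replicate (2*n + 3) (List.replicate (n + 2) ' ')
      = shape false false false false false false false n := by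
  have hb : hrowL false n = List.replicate (n + 2) ' ' := by
    show ' ' :: List.replicate n ' ' ++ [' '] = _
    exact cons_replicate_append ' ' n
  have hv : vrowL false false n = List.replicate (n + 2) ' ' := by
    show ' ' :: List.replicate n ' ' ++ [' '] = _
    exact cons_replicate_append ' ' n
  rw [shape, hb, hv]
  rw [show 2*n + 3 = 1 + (n + (1 + (n + 1))) from by ring,
      List.replicate_add, List.replicate_add, List.replicate_add, List.replicate_add]
  simp [List.replicate_succ]
  exact (List.replicate_succ).symm.trans (List.replicate_succ')

theorem masterA (n : Nat) (d : Int) (t ul ur m ll lr b : Bool)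
    (hseg : getSegments d = segList t ul ur m ll lr b) :
    resize_digit d (n : Int) = (shape t m b ul ur ll lr n).map String.ofList := by
  rw [resize_digit]
  simp only [hseg, segList]
  have hh : (((n : Int) + 1) * 2 + 1).toNat = 2*n + 3 := by omega
  have hw : (((n : Int) + 1) + 1).toNat = n + 2 := by omega
  rw [hh, hw, grid0_eq]
  rw [List.foldl_append, List.foldl_append, List.foldl_append, List.foldl_append,
      List.foldl_append, List.foldl_append]
  rw [stepT, stepUL, stepUR, stepM, stepLL, stepLR, stepB]

theorem masterB (n : Nat) (d : Int) (t ul ur m ll lr b : Bool)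
    (h1 : (rowChar (nthRow d 0) 1 == '-') = t) (h2 : (rowChar (nthRow d 2) 1 == '-') = m)
    (h3 : (rowChar (nthRow d 4) 1 == '-') = b) (h4 : (rowChar (nthRow d 1) 0 == '|') = ul)
    (h5 : (rowChar (nthRow d 1) 2 == '|') = ur) (h6 : (rowChar (nthRow d 3) 0 == '|') = ll)
    (h7 : (rowChar (nthRow d 3) 2 == '|') = lr) :
    resize_digit_alt d (n : Int) = (shape t m b ul ur ll lr n).map String.ofList := by
  rw [resize_digit_alt]
  simp only [h1, h2, h3, h4, h5, h6, h7]
  simp [shape, horizLine, vertLine, hrowL, vrowL, List.map_replicate]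

theorem dig0 (n : Nat) : resize_digit 0 (n : Int) = resize_digit_alt 0 (n : Int) :=
  (masterA n 0 true true true false true true true (by decide)).trans
    (masterB n 0 true true true false true true true (by decide) (by decide) (by decide)
      (by decide) (by decide) (by decide) (by decide)).symm

theorem dig1 (n : Nat) : resize_digit 1 (n : Int) = resize_digit_alt 1 (n : Int) :=
  (masterA n 1 false false true false false true false (by decide)).trans
    (masterB n 1 false false true false false true false (by decide) (by decide) (by decide)
      (by decide) (by decide) (by decide) (by decide)).symm

theorem dig2 (n : Nat) : resize_digit 2 (n : Int) = resize_digit_alt 2 (n : Int) :=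
  (masterA n 2 true false true true true false true (by decide)).trans
    (masterB n 2 true false true true true false true (by decide) (by decide) (by decide)
      (by decide) (by decide) (by decide) (by decide)).symm

theorem dig3 (n : Nat) : resize_digit 3 (n : Int) = resize_digit_alt 3 (n : Int) :=
  (masterA n 3 true false true true false true true (by decide)).trans
    (masterB n 3 true false true true false true true (by decide) (by decide) (by decide)
      (by decide) (by decide) (by decide) (by decide)).symm

theorem dig4 (n : Nat) : resize_digit 4 (n : Int) = resize_digit_alt 4 (n : Int) :=
  (masterA n 4 false true true true false true false (by decide)).trans
    (masterB n 4 false true true true false true false (by decide) (by decide) (by decide)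
      (by decide) (by decide) (by decide) (by decide)).symm

theorem dig5 (n : Nat) : resize_digit 5 (n : Int) = resize_digit_alt 5 (n : Int) :=
  (masterA n 5 true true false true false true true (by decide)).trans
    (masterB n 5 true true false true false true true (by decide) (by decide) (by decide)
      (by decide) (by decide) (by decide) (by decide)).symm

theorem dig6 (n : Nat) : resize_digit 6 (n : Int) = resize_digit_alt 6 (n : Int) :=
  (masterA n 6 true true false true true true true (by decide)).trans
    (masterB n 6 true true false true true true true (by decide) (by decide) (by decide)
      (by decide) (by decide) (by decide) (by decide)).symm

theorem dig7 (n : Nat) : resize_digit 7 (n : Int) = resize_digit_alt 7 (n : Int) :=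
  (masterA n 7 true false true false false true false (by decide)).trans
    (masterB n 7 true false true false false true false (by decide) (by decide) (by decide)
      (by decide) (by decide) (by decide) (by decide)).symm

theorem dig8 (n : Nat) : resize_digit 8 (n : Int) = resize_digit_alt 8 (n : Int) :=
  (masterA n 8 true true true true true true true (by decide)).trans
    (masterB n 8 true true true true true true true (by decide) (by decide) (by decide)
      (by decide) (by decide) (by decide) (by decide)).symm

theorem dig9 (n : Nat) : resize_digit 9 (n : Int) = resize_digit_alt 9 (n : Int) :=
  (masterA n 9 true true true true false true true (by decide)).trans
    (masterB n 9 true true true true false true true (by decide) (by decide) (by decide)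
      (by decide) (by decide) (by decide) (by decide)).symm

-- ===== VERDICT (by name: the statement is the Claim_ definition above) =====
theorem resize_digit_spec : Claim_equal_resize_digit := by
  intro d s _ hpre
  unfold Pre_resize_digit at hpre
  obtain ⟨h0, h9, hs⟩ := hpre
  unfold Spec_resize_digit
  obtain ⟨n, rfl⟩ : ∃ n : Nat, s = (n : Int) := ⟨s.toNat, (Int.toNat_of_nonneg hs).symm⟩
  interval_cases d
  exacts [dig0 n, dig1 n, dig2 n, dig3 n, dig4 n, dig5 n, dig6 n, dig7 n, dig8 n, dig9 n]
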